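-- pv_equiv track=rewrite | github.com/EGC-G2-tortilla/tortilla-hub | app/modules/featuremodel/models.py | calculate_max_depth
-- ===== SOURCE A (Python) =====
-- def calculate_max_depth(lines):
--     depth_stack = []  # Pila para rastrear profundidad
--     max_depth = 0  # Profundidad máxima
--     in_features_section = False
--     found_features_section = False  # Bandera para detectar "features"
--
--     for line in lines:
--         stripped_line = line.strip()
--
--         # Detectar inicio de la sección de características
--         if stripped_line.lower().startswith("features"):
--             in_features_section = True
--             found_features_section = True  # Marcar que se encontró la sección
--             depth_stack = []  # Reiniciar pila de profundidad
--             continue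
--         elif stripped_line.lower().startswith("constraints"):
--             in_features_section = False
--             continue
--
--         # Procesar solo líneas en la sección de características
--         if in_features_section and stripped_line:
--             leading_spaces = len(line) - len(line.lstrip())
--             depth = (
--                 leading_spaces // 4
--             )  # Suponemos que 4 espacios equivalen a un nivel
--
--             # Manejar la pila de profundidad
--             while len(depth_stack) > depth:
--                 depth_stack.pop()
--             depth_stack.append(stripped_line)
--
--             # Actualizar profundidad máxima
--             max_depth = max(
--                 max_depth, len(depth_stack) - 1
--             )  # Restar 1 para excluir la raíz
--
--     # Si no se encontró la sección "features", devolver profundidad 0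
--     if not found_features_section:
--         return 0
--
--     return max_depth
-- ===== SOURCE B (Python) =====
-- def calculate_max_depth(lines):
--     # Stage 1: collect, per features segment, the list of depths (indent // 4)
--     # of its non-empty lines.
--     found = False
--     segments = []
--     cur = None  # depth list of the current features segment, None outside one
--     for line in lines:
--         stripped = line.strip()
--         low = stripped.lower()
--         if low.startswith("features"):
--             found = True
--             if cur is not None:
--                 segments.append(cur)
--             cur = []
--         elif low.startswith("constraints"):
--             if cur is not None:
--                 segments.append(cur)
--             cur = None
--         elif cur is not None and stripped:
--             cur.append((len(line) - len(line.lstrip())) // 4)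
--     if cur is not None:
--         segments.append(cur)
--     if not found:
--         return 0
--     # Stage 2: the nesting-stack size after the i-th line of a segment has the
--     # closed form min(i, m + i + 1), where m = min_{j<=i} (d_j - j); so a running
--     # minimum of d_j - j replaces the stack entirely.
--     best = 0
--     for ds in segments:
--         m = None
--         for i, d in enumerate(ds, start=1):
--             m = d - i if m is None else min(m, d - i)
--             h = min(i, m + i + 1) - 1
--             if h > best:
--                 best = h
--     return best
-- ===== Notes on version B (the rewrite author's own statement) =====
-- stated objective: alternative
-- what changed: Two staged passes instead of A's one-pass stack machine: first collect each features segment's list of indentation depths, then score each segment with the closed form min(i, m+i+1) for the stack size, where m is a running minimum of depth_j - j, eliminating the stack and its pop loop entirely.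
import Mathlib
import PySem

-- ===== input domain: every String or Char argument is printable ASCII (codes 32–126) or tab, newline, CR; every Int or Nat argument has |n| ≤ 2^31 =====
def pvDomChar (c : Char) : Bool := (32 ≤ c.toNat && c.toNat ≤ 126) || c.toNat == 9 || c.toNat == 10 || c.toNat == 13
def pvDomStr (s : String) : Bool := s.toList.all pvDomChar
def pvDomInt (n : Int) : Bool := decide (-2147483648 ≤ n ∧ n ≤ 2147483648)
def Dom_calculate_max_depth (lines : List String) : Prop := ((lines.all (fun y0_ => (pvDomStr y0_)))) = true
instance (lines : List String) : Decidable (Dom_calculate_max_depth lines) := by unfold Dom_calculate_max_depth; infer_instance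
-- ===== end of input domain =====

-- B replaces A's one-pass stack machine by two staged passes: collect each features
-- segment's depth list, then score segments by a running-minimum closed form for the
-- stack size; objective: alternative. The return value is proved equal on all inputs.

-- ===== PORT A =====
-- 'while len(depth_stack) > depth: depth_stack.pop()' as a recursion popping the last element;
-- the [] case (where Python's pop() would raise) is unreachable since every call has depth ≥ 0.
def pvPopWhile (stack : List String) (depth : Int) : List String :=
  match stack with
  | [] => []
  | a :: l =>
      if (PySem.List.len (a :: l)) > depth then pvPopWhile (a :: l).dropLast depth
      else a :: l
termination_by stack.length
decreasing_by simp

def pvStepA (s : List String × Int × Bool × Bool) (line : String) : List String × Int × Bool × Bool :=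
  let stripped := PySem.Str.strip line
  if PySem.Str.startswith (PySem.Str.lower stripped) "features" then
    ([], s.2.1, true, true)
  else if PySem.Str.startswith (PySem.Str.lower stripped) "constraints" then
    (s.1, s.2.1, false, s.2.2.2)
  else if s.2.2.1 && (PySem.Str.len stripped != 0) then
    let leading_spaces := PySem.Str.len line - PySem.Str.len (PySem.Str.lstrip line)
    let depth := PySem.Int.floordiv leading_spaces 4
    let stack' := pvPopWhile s.1 depth ++ [stripped]
    (stack', max s.2.1 (PySem.List.len stack' - 1), s.2.2.1, s.2.2.2)
  else s

def calculate_max_depth (lines : List String) : Int :=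
  let st := lines.foldl pvStepA ([], 0, false, false)
  if !st.2.2.2 then 0 else st.2.1

-- ===== PORT B =====
-- Stage 1: state (found, segments, cur); cur is the current segment's depth list.
def pvSeg1 (s : Bool × List (List Int) × Option (List Int)) (line : String) :
    Bool × List (List Int) × Option (List Int) :=
  let stripped := PySem.Str.strip line
  let low := PySem.Str.lower stripped
  if PySem.Str.startswith low "features" then
    (true, (match s.2.2 with | some c => s.2.1 ++ [c] | none => s.2.1), some [])
  else if PySem.Str.startswith low "constraints" then
    (s.1, (match s.2.2 with | some c => s.2.1 ++ [c] | none => s.2.1), none)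
  else
    match s.2.2 with
    | some c =>
        if PySem.Str.len stripped != 0 then
          (s.1, s.2.1, some (c ++ [PySem.Int.floordiv (PySem.Str.len line - PySem.Str.len (PySem.Str.lstrip line)) 4]))
        else s
    | none => s

-- Stage 2 inner loop: state (i, m, best); enumerate(ds, start=1) as an index counter.
def pvInner (s : Int × Option Int × Int) (d : Int) : Int × Option Int × Int :=
  let i := s.1 + 1
  let m := match s.2.1 with | none => d - i | some mv => min mv (d - i)
  let h := min i (m + i + 1) - 1
  (i, some m, if h > s.2.2 then h else s.2.2)

def pvSegBest (b : Int) (ds : List Int) : Int := (ds.foldl pvInner (0, none, b)).2.2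

def calculate_max_depth_alt (lines : List String) : Int :=
  let st := lines.foldl pvSeg1 (false, [], none)
  let segments := match st.2.2 with | some c => st.2.1 ++ [c] | none => st.2.1
  if !st.1 then 0 else segments.foldl pvSegBest 0

-- ===== PRECONDITION & SPEC =====
def Spec_calculate_max_depth (lines : List String) (out : Int) : Prop := out = calculate_max_depth_alt lines
instance (lines : List String) (out : Int) : Decidable (Spec_calculate_max_depth lines out) := by unfold Spec_calculate_max_depth; infer_instance

-- ===== CLAIM (what is proved, stated in full; the proofs are below) =====
def Claim_equal_calculate_max_depth : Prop := ∀ (lines : List String), Dom_calculate_max_depth lines → Spec_calculate_max_depth lines (calculate_max_depth lines)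

-- ===== LEMMAS AND PROOFS =====

-- proof-side reference semantics of a segment: the simple stack-size recurrence
def pvPair (p : Int × Int) (d : Int) : Int × Int := (min p.1 d + 1, max p.2 (min p.1 d))

def pvCLen (ds : List Int) : Int := ds.foldl (fun c d => min c d + 1) 0

def pvBigB (L : List (List Int)) : Int := L.foldl (fun b ds => (ds.foldl pvPair (0, b)).2) 0

theorem pvPopWhile_len (depth : Int) (h : 0 ≤ depth) (stack : List String) :
    ((pvPopWhile stack depth).length : Int) = min (stack.length : Int) depth := by
  induction stack using pvPopWhile.induct depth with
  | case1 =>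
      simp [pvPopWhile]; omega
  | case2 a l hlt ih =>
      rw [pvPopWhile]
      simp only [hlt, if_pos]
      rw [ih]
      simp [PySem.List.len_eq, List.length_cons] at hlt
      simp [List.length_dropLast, List.length_cons]
      omega
  | case3 a l hge =>
      rw [pvPopWhile]
      simp only [hge, if_false]
      simp [PySem.List.len_eq, List.length_cons] at hge ⊢
      omega

theorem pvDepth_nonneg (line : String) :
    0 ≤ PySem.Int.floordiv (PySem.Str.len line - PySem.Str.len (PySem.Str.lstrip line)) 4 := by
  have h : PySem.Str.len (PySem.Str.lstrip line) ≤ PySem.Str.len line := by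
    simp [PySem.Str.lstrip, PySem.Str.len_eq, PySem.Chars.lstrip]
    exact_mod_cast List.length_dropWhile_le _ _
  simp [PySem.Int.floordiv]
  simp [PySem.Str.len_eq] at h
  exact Int.fdiv_nonneg (by omega) (by norm_num)

-- the c-component of the pvPair fold ignores the best accumulator
theorem pvPair_fst (ds : List Int) (c0 b : Int) :
    (ds.foldl pvPair (c0, b)).1 = ds.foldl (fun c d => min c d + 1) c0 := by
  induction ds generalizing c0 b with
  | nil => rfl
  | cons d ds ih => simp [pvPair, ih]

-- arithmetic facts about the running-min closed form (stated standalone for omega)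
theorem pvIfMax1 (i0 b d : Int) :
    (if min (i0 + 1) (d - (i0 + 1) + (i0 + 1) + 1) - 1 > b
      then min (i0 + 1) (d - (i0 + 1) + (i0 + 1) + 1) - 1 else b) = max b (min i0 d) := by
  split_ifs <;> omega

theorem pvIfMax2 (i0 mv b d : Int) :
    (if min (i0 + 1) (min mv (d - (i0 + 1)) + (i0 + 1) + 1) - 1 > b
      then min (i0 + 1) (min mv (d - (i0 + 1)) + (i0 + 1) + 1) - 1 else b)
    = max b (min (min i0 (mv + i0 + 1)) d) := by
  split_ifs <;> omega

-- B's inner loop (index + running min) computes the simple recurrence fold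
theorem pvInner_eq (ds : List Int) (i0 : Int) (m0 : Option Int) (b c0 : Int)
    (hr : (m0 = none → c0 = i0) ∧ ∀ mv, m0 = some mv → c0 = min i0 (mv + i0 + 1)) :
    (ds.foldl pvInner (i0, m0, b)).2.2 = (ds.foldl pvPair (c0, b)).2 := by
  induction ds generalizing i0 m0 b c0 with
  | nil => rfl
  | cons d ds ih =>
      simp only [List.foldl_cons]
      cases m0 with
      | none =>
          have hc : c0 = i0 := hr.1 rfl
          have hx : pvInner (i0, none, b) d = (i0 + 1, some (d - (i0 + 1)), max b (min c0 d)) := by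
            subst hc
            simp only [pvInner, Prod.mk.injEq, true_and]
            exact pvIfMax1 c0 b d
          rw [hx, show pvPair (c0, b) d = (min c0 d + 1, max b (min c0 d)) from rfl]
          refine ih (i0 + 1) (some (d - (i0 + 1))) (max b (min c0 d)) (min c0 d + 1) ⟨?_, ?_⟩
          · intro h; simp at h
          · intro mv hmv; rw [Option.some.injEq] at hmv; omega
      | some mv =>
          have hc : c0 = min i0 (mv + i0 + 1) := hr.2 mv rfl
          have hx : pvInner (i0, some mv, b) d
              = (i0 + 1, some (min mv (d - (i0 + 1))), max b (min c0 d)) := by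
            subst hc
            simp only [pvInner, Prod.mk.injEq, true_and]
            exact pvIfMax2 i0 mv b d
          rw [hx, show pvPair (c0, b) d = (min c0 d + 1, max b (min c0 d)) from rfl]
          refine ih (i0 + 1) (some (min mv (d - (i0 + 1)))) (max b (min c0 d)) (min c0 d + 1) ⟨?_, ?_⟩
          · intro h; simp at h
          · intro mv' hmv'; rw [Option.some.injEq] at hmv'; omega

theorem pvSegBest_eq (b : Int) (ds : List Int) :
    pvSegBest b ds = (ds.foldl pvPair (0, b)).2 :=
  pvInner_eq ds 0 none b 0 ⟨fun _ => rfl, fun mv h => by cases h⟩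

theorem pvStage2_eq (L : List (List Int)) (b : Int) :
    L.foldl pvSegBest b = L.foldl (fun b ds => (ds.foldl pvPair (0, b)).2) b := by
  induction L generalizing b with
  | nil => rfl
  | cons ds L ih => simp only [List.foldl_cons, pvSegBest_eq, ih]

def pvFlush (s : Bool × List (List Int) × Option (List Int)) : List (List Int) :=
  match s.2.2 with | some c => s.2.1 ++ [c] | none => s.2.1

-- invariant relation between A's fold state and B's stage-1 state
def pvRel (sa : List String × Int × Bool × Bool) (sb : Bool × List (List Int) × Option (List Int)) : Prop :=
  sa.2.2.2 = sb.1 ∧ sa.2.2.1 = sb.2.2.isSome ∧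
  (∀ c, sb.2.2 = some c → (sa.1.length : Int) = pvCLen c) ∧
  sa.2.1 = pvBigB (pvFlush sb)

theorem pvBigB_append_nil (L : List (List Int)) : pvBigB (L ++ [[]]) = pvBigB L := by
  simp [pvBigB]

theorem pvBigB_snoc_snoc (L : List (List Int)) (c : List Int) (d : Int) :
    pvBigB (L ++ [c ++ [d]]) = max (pvBigB (L ++ [c])) (min (pvCLen c) d) := by
  simp only [pvBigB, List.foldl_append, List.foldl_cons, List.foldl_nil, pvPair]
  rw [pvPair_fst]
  rfl

theorem pvCLen_snoc (c : List Int) (d : Int) : pvCLen (c ++ [d]) = min (pvCLen c) d + 1 := by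
  simp [pvCLen, List.foldl_append]

theorem pvStep_rel (sa : List String × Int × Bool × Bool)
    (sb : Bool × List (List Int) × Option (List Int)) (line : String)
    (h : pvRel sa sb) : pvRel (pvStepA sa line) (pvSeg1 sb line) := by
  obtain ⟨stk, mx, inf, fnd⟩ := sa
  obtain ⟨fnd', segs, cur⟩ := sb
  obtain ⟨h1, h2, h3, h4⟩ := h
  simp only at h1 h2 h3 h4
  unfold pvStepA pvSeg1
  dsimp only
  by_cases hf : PySem.Str.startswith (PySem.Str.lower (PySem.Str.strip line)) "features"
  · simp only [hf, if_pos]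
    refine ⟨rfl, rfl, ?_, ?_⟩
    · intro c hc
      cases hc
      simp [pvCLen]
    · cases cur with
      | none =>
          simp only [pvFlush] at h4 ⊢
          rw [h4, pvBigB_append_nil]
      | some c =>
          simp only [pvFlush] at h4 ⊢
          rw [h4, ← pvBigB_append_nil (segs ++ [c])]
  · simp only [hf, Bool.false_eq_true, if_false]
    by_cases hc : PySem.Str.startswith (PySem.Str.lower (PySem.Str.strip line)) "constraints"
    · simp only [hc, if_pos]
      refine ⟨h1, rfl, by simp, ?_⟩
      cases cur <;> simp_all [pvFlush]
    · simp only [hc, Bool.false_eq_true, if_false]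
      cases cur with
      | none =>
          have hinf : inf = false := by simpa using h2
          simp [hinf, pvRel, h1, h4]
      | some c =>
          have hinf : inf = true := by simpa using h2
          by_cases hs : PySem.Str.len (PySem.Str.strip line) != 0
          · simp only [hinf, hs, Bool.true_and, if_pos]
            set d := PySem.Int.floordiv (PySem.Str.len line - PySem.Str.len (PySem.Str.lstrip line)) 4 with hd
            have hd0 : 0 ≤ d := pvDepth_nonneg line
            have hlen := pvPopWhile_len d hd0 stk
            have hcl := h3 c rfl
            refine ⟨h1, rfl, ?_, ?_⟩
            · intro c' hc'
              cases hc'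
              rw [pvCLen_snoc, ← hcl, ← hlen]
              simp
            · have hbig := pvBigB_snoc_snoc segs c d
              simp only [pvFlush] at h4 ⊢
              rw [hbig, ← h4, ← hcl]
              simp only [PySem.List.len_eq, List.length_append, List.length_cons,
                List.length_nil]
              omega
          · simp only [hinf, hs, Bool.true_and, Bool.false_eq_true, if_false]
            exact ⟨h1, by simp, h3, h4⟩

theorem pvFold_rel (lines : List String) (sa : List String × Int × Bool × Bool)
    (sb : Bool × List (List Int) × Option (List Int)) (h : pvRel sa sb) :
    pvRel (lines.foldl pvStepA sa) (lines.foldl pvSeg1 sb) := by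
  induction lines generalizing sa sb with
  | nil => exact h
  | cons l ls ih =>
      rw [List.foldl_cons, List.foldl_cons]
      exact ih _ _ (pvStep_rel sa sb l h)

-- ===== VERDICT (by name: the statement is the Claim_ definition above) =====
theorem calculate_max_depth_spec : Claim_equal_calculate_max_depth := by
  intro lines _
  unfold Spec_calculate_max_depth calculate_max_depth calculate_max_depth_alt
  dsimp only
  obtain ⟨h1, -, -, h4⟩ := pvFold_rel lines ([], 0, false, false) (false, [], none)
    ⟨rfl, rfl, by simp, by simp [pvFlush, pvBigB]⟩
  revert h1 h4
  generalize lines.foldl pvStepA ([], 0, false, false) = sa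
  generalize lines.foldl pvSeg1 (false, [], none) = sb
  obtain ⟨stk, mx, inf, fnd⟩ := sa
  obtain ⟨fnd', segs, cur⟩ := sb
  intro h1 h4
  simp only at h1 h4
  subst h1
  cases fnd with
  | false => simp
  | true =>
      simp only [Bool.not_true, Bool.false_eq_true, if_false, pvStage2_eq]
      simpa [pvFlush, pvBigB] using h4
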